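-- pv_equiv track=rewrite | github.com/mahiryuzer049-sudo/yandex-pet-day-prototypes | yandex-pet-day-test/web/scripts/export_github_pages.py | rewrite_css_paths
-- ===== SOURCE A (Python) =====
-- BASE_PATH = "/yandex-pet-day-prototypes"
--
-- def rewrite_css_paths(css_text: str) -> str:
--     replacements = {
--         "url(/variant-a-assets/": f"url({BASE_PATH}/variant-a-assets/",
--         'url("/variant-a-assets/': f'url("{BASE_PATH}/variant-a-assets/',
--         "url('/variant-a-assets/": f"url('{BASE_PATH}/variant-a-assets/",
--         "url(/favicon.ico": f"url({BASE_PATH}/favicon.ico",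
--         'url("/favicon.ico': f'url("{BASE_PATH}/favicon.ico',
--         "url('/favicon.ico": f"url('{BASE_PATH}/favicon.ico",
--         "url(/_next/static/": f"url({BASE_PATH}/_next/static/",
--         'url("/_next/static/': f'url("{BASE_PATH}/_next/static/',
--         "url('/_next/static/": f"url('{BASE_PATH}/_next/static/",
--     }
--
--     for source, target in replacements.items():
--         css_text = css_text.replace(source, target)
--
--     return css_text
-- ===== SOURCE B (Python) =====
-- BASE_PATH = "/yandex-pet-day-prototypes"
--
-- # Single left-to-right pass: at each position try the 9 (source, target) rules
-- # (built from the 3 paths x 3 quote styles); on a hit emit the target and jump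
-- # past the source, otherwise copy one character.  One traversal instead of
-- # nine full-string replace passes.
-- def rewrite_css_paths(css_text: str) -> str:
--     rules = [
--         ("url(" + q + p, "url(" + q + BASE_PATH + p)
--         for p in ("/variant-a-assets/", "/favicon.ico", "/_next/static/")
--         for q in ("", '"', "'")
--     ]
--     out = []
--     i = 0
--     n = len(css_text)
--     while i < n:
--         for src, tgt in rules:
--             if css_text.startswith(src, i):
--                 out.append(tgt)
--                 i += len(src)
--                 break
--         else:
--             out.append(css_text[i])
--             i += 1
--     return "".join(out)
-- ===== Notes on version B (the rewrite author's own statement) =====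
-- stated objective: alternative
-- what changed: Replaces nine sequential full-string str.replace passes by a single left-to-right scan that tries the nine prefix rules at each position and splices the base path in one traversal.
import Mathlib
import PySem

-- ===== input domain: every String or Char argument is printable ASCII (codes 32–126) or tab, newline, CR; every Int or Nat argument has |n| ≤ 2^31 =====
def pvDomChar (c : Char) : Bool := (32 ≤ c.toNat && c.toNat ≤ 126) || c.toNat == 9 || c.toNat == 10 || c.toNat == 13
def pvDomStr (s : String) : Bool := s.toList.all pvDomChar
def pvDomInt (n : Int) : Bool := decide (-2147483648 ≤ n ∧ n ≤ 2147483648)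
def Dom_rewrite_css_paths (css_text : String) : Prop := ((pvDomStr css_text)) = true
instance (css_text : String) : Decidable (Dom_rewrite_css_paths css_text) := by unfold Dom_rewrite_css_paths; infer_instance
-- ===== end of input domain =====

-- B replaces A's nine sequential full-string str.replace passes by one left-to-right
-- scan that tries the nine prefix rules at each position (objective: alternative algorithm).
-- Both ports run on the code-point lists (string literals are written as char lists;
-- PySem.Chars.replace IS str.replace on code points).

def pvU : List Char := ['u','r','l','(']                                       -- "url("
def pvBase : List Char :=                                                      -- BASE_PATH
  ['/','y','a','n','d','e','x','-','p','e','t','-','d','a','y','-','p','r','o','t','o','t','y','p','e','s']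
def pvPathV : List Char := ['/','v','a','r','i','a','n','t','-','a','-','a','s','s','e','t','s','/']
def pvPathF : List Char := ['/','f','a','v','i','c','o','n','.','i','c','o']
def pvPathN : List Char := ['/','_','n','e','x','t','/','s','t','a','t','i','c','/']

-- ===== PORT A =====
-- A's dict of nine replacements, in insertion order (BASE_PATH spliced in, as in the f-strings).
def pvReplacementsA : List (List Char × List Char) :=
  [ (pvU ++ pvPathV,           pvU ++ pvBase ++ pvPathV),
    (pvU ++ ['"'] ++ pvPathV,  pvU ++ ['"'] ++ pvBase ++ pvPathV),
    (pvU ++ ['\''] ++ pvPathV, pvU ++ ['\''] ++ pvBase ++ pvPathV),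
    (pvU ++ pvPathF,           pvU ++ pvBase ++ pvPathF),
    (pvU ++ ['"'] ++ pvPathF,  pvU ++ ['"'] ++ pvBase ++ pvPathF),
    (pvU ++ ['\''] ++ pvPathF, pvU ++ ['\''] ++ pvBase ++ pvPathF),
    (pvU ++ pvPathN,           pvU ++ pvBase ++ pvPathN),
    (pvU ++ ['"'] ++ pvPathN,  pvU ++ ['"'] ++ pvBase ++ pvPathN),
    (pvU ++ ['\''] ++ pvPathN, pvU ++ ['\''] ++ pvBase ++ pvPathN) ]

-- 'for source, target in replacements.items(): css_text = css_text.replace(source, target)'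
def rewrite_css_paths (css_text : String) : String :=
  String.ofList
    (pvReplacementsA.foldl (fun acc st => PySem.Chars.replace acc st.1 st.2) css_text.toList)

-- ===== PORT B =====
-- Source B's rules comprehension: paths outer, quotes ("", '"', "'") inner.
def pvRulesB : List (List Char × List Char) :=
  ([pvPathV, pvPathF, pvPathN]).flatMap
    (fun p => ([([] : List Char), ['"'], ['\'']]).map
      (fun q => (pvU ++ q ++ p, pvU ++ q ++ pvBase ++ p)))

-- Source B's while loop over positions: first rule whose source starts here, else copy one char.
-- ('i += len(src)' on the whole string becomes 'rest.drop (src.length - 1)' on the tail.)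
def pvScanB : List Char → List Char
  | [] => []
  | c :: rest =>
    match pvRulesB.find? (fun r => r.1.isPrefixOf (c :: rest)) with
    | some (src, tgt) => tgt ++ pvScanB (rest.drop (src.length - 1))
    | none => c :: pvScanB rest
termination_by l => l.length
decreasing_by
  · simp only [List.length_drop, List.length_cons]; omega
  · simp

def rewrite_css_paths_alt (css_text : String) : String :=
  String.ofList (pvScanB css_text.toList)

-- ===== PRECONDITION & SPEC =====
def Spec_rewrite_css_paths (css_text : String) (out : String) : Prop := out = rewrite_css_paths_alt css_text
instance (css_text : String) (out : String) : Decidable (Spec_rewrite_css_paths css_text out) := by unfold Spec_rewrite_css_paths; infer_instance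

-- ===== CLAIM (what is proved, stated in full; the proofs are below) =====
def Claim_equal_rewrite_css_paths : Prop := ∀ (css_text : String), Dom_rewrite_css_paths css_text → Spec_rewrite_css_paths css_text (rewrite_css_paths css_text)

-- ===== LEMMAS AND PROOFS =====

theorem pvHeadEq {l : List Char} (h : l.head? = some 'u') : ∃ t, l = 'u' :: t := by
  cases l with
  | nil => simp at h
  | cons a t => simp at h; exact ⟨t, by rw [h]⟩

-- Clean recursive form of CPython's str.replace left-to-right scan (for a non-empty pattern).
def pvRepc (o n : List Char) : List Char → List Char
  | [] => []
  | c :: t => if o.isPrefixOf (c :: t) then n ++ pvRepc o n (t.drop (o.length - 1)) else c :: pvRepc o n t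
termination_by l => l.length
decreasing_by
  · simp only [List.length_drop, List.length_cons]; omega
  · simp

theorem pvGoEq (o n : List Char) (ho : o ≠ []) :
    ∀ (fuel : Nat) (l acc : List Char), l.length ≤ fuel →
      PySem.Chars.replace.go o n fuel l acc = acc.reverse ++ pvRepc o n l := by
  intro fuel
  induction fuel with
  | zero =>
    intro l acc hl
    have : l = [] := by cases l <;> simp_all
    subst this
    simp [PySem.Chars.replace.go, pvRepc]
  | succ f ih =>
    intro l acc hl
    match l with
    | [] => simp [PySem.Chars.replace.go, pvRepc]
    | c :: t =>
      rw [PySem.Chars.replace.go]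
      by_cases hp : o.isPrefixOf (c :: t)
      · rw [if_pos hp]
        have hol : 1 ≤ o.length := by cases o <;> simp_all
        have hdrop : List.drop o.length (c :: t) = t.drop (o.length - 1) := by
          obtain ⟨k, hk⟩ : ∃ k, o.length = k + 1 := ⟨o.length - 1, by omega⟩
          simp [hk]
        rw [hdrop, ih _ _ (by simp only [List.length_drop]; simp at hl; omega)]
        rw [pvRepc, if_pos hp]
        simp
      · rw [if_neg hp]
        rw [ih _ _ (by simp at hl; omega)]
        rw [pvRepc, if_neg hp]
        simp

theorem pvReplaceEq (s o n : List Char) (ho : o ≠ []) :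
    PySem.Chars.replace s o n = pvRepc o n s := by
  rw [PySem.Chars.replace]
  rw [if_neg (by simp [List.isEmpty_iff, ho])]
  simpa using pvGoEq o n ho s.length s [] le_rfl

-- the nine-replacement fold, in the clean form
def pvFoldA (ps : List (List Char × List Char)) (l : List Char) : List Char :=
  ps.foldl (fun acc pr => pvRepc pr.1 pr.2 acc) l

theorem pvPortA_toList (css : String) :
    rewrite_css_paths css = String.ofList (pvFoldA pvReplacementsA css.toList) := by
  have key : ∀ (ps : List (List Char × List Char)), (∀ pr ∈ ps, pr.1 ≠ []) →
      ∀ l : List Char,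
        ps.foldl (fun acc st => PySem.Chars.replace acc st.1 st.2) l = pvFoldA ps l := by
    intro ps
    induction ps with
    | nil => intro _ l; rfl
    | cons pr ps' ih =>
      intro h l
      show List.foldl _ (PySem.Chars.replace l pr.1 pr.2) ps' = _
      rw [pvReplaceEq l pr.1 pr.2 (h pr (by simp)), ih (fun q hq => h q (by simp [hq]))]
      rfl
  rw [rewrite_css_paths, key pvReplacementsA (by decide)]

-- p <+: u ++ x forces p <+: u or u <+: p
theorem pvPrefixAppendCases {p u x : List Char} (h : p <+: u ++ x) : p <+: u ∨ u <+: p := by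
  obtain ⟨s, hs⟩ := h
  rcases List.append_eq_append_iff.mp hs with ⟨a', ha1, _⟩ | ⟨c', hc1, _⟩
  · exact Or.inl ⟨a', ha1.symm⟩
  · exact Or.inr ⟨c', hc1.symm⟩

-- push pvRepc through a block u inside which no match can start
theorem pvRepcAppend (o n u x : List Char)
    (h : ∀ v, v ≠ [] → v <:+ u → ¬ o <+: (v ++ x)) :
    pvRepc o n (u ++ x) = u ++ pvRepc o n x := by
  induction u with
  | nil => rfl
  | cons c u' ih =>
    have hm : ¬ o.isPrefixOf (c :: (u' ++ x)) := by
      intro hp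
      exact h (c :: u') (by simp) (List.suffix_refl _) (by simpa using List.isPrefixOf_iff_prefix.mp hp)
    rw [show (c :: u') ++ x = c :: (u' ++ x) from rfl, pvRepc, if_neg hm]
    rw [ih (fun v hv hsuf => h v hv (hsuf.trans (List.suffix_cons _ _)))]
    rfl

theorem pvHeadOfSuffix {u : List Char} {c : Char} {v' : List Char}
    (hsuf : (c :: v') <:+ u) (hne : (c :: v') ≠ u) : c ∈ u.drop 1 := by
  obtain ⟨w, hw⟩ := hsuf
  have hwne : w ≠ [] := by
    intro h; apply hne; rw [← hw, h]; rfl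
  match w, hwne with
  | d :: w', _ =>
    have : u.drop 1 = w' ++ (c :: v') := by rw [← hw]; rfl
    rw [this]; simp

-- the instantiable push-through lemma
theorem pvRepcAppendOf (o n u x : List Char) (ho : o.head? = some 'u')
    (h1 : ¬ o <+: u) (h2 : ¬ u <+: o) (h3 : 'u' ∉ u.drop 1) :
    pvRepc o n (u ++ x) = u ++ pvRepc o n x := by
  apply pvRepcAppend
  intro v hv hsuf hpre
  by_cases hvu : v = u
  · subst hvu
    rcases pvPrefixAppendCases hpre with h | h
    · exact h1 h
    · exact h2 h
  · obtain ⟨o', ho'⟩ := pvHeadEq ho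
    match v, hv with
    | c :: v', _ =>
      have hc : c ∈ u.drop 1 := pvHeadOfSuffix hsuf hvu
      rw [ho'] at hpre
      have : c = 'u' := ((List.cons_prefix_cons.mp hpre).1).symm
      exact h3 (this ▸ hc)

-- prefix preservation: pvRepc never creates or destroys a 'u'-free prefix
theorem pvPres (o n : List Char) (ho : o.head? = some 'u') (hn : n.head? = some 'u') :
    ∀ l s, 'u' ∉ s → (s <+: pvRepc o n l ↔ s <+: l) := by
  intro l
  induction l using pvRepc.induct o with
  | case1 => intro s hs; rw [pvRepc]
  | case2 c t hp ih =>
    intro s hs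
    rw [pvRepc, if_pos hp]
    obtain ⟨o', ho'⟩ := pvHeadEq ho
    obtain ⟨n', hn'⟩ := pvHeadEq hn
    cases s with
    | nil => simp
    | cons s0 s' =>
      have hs0 : s0 ≠ 'u' := by simp at hs; exact Ne.symm hs.1
      have hc : c = 'u' := by
        rw [ho'] at hp
        exact ((List.cons_prefix_cons.mp (List.isPrefixOf_iff_prefix.mp hp)).1).symm
      rw [hn']
      constructor
      · intro h; exact absurd (List.cons_prefix_cons.mp h).1 hs0
      · intro h; exact absurd ((List.cons_prefix_cons.mp h).1.trans hc) hs0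
  | case3 c t hp ih =>
    intro s hs
    rw [pvRepc, if_neg hp]
    cases s with
    | nil => simp
    | cons s0 s' =>
      have hs' : 'u' ∉ s' := by simp at hs; exact hs.2
      simp only [List.cons_prefix_cons]
      rw [ih s' hs']

-- conditions every pair of the table satisfies (checked by decide below)
abbrev pvGood (pr : List Char × List Char) : Prop :=
  pr.1.head? = some 'u' ∧ pr.2.head? = some 'u' ∧ 'u' ∉ pr.1.drop 1 ∧ 'u' ∉ pr.2.drop 1

theorem pvFoldCons (ps : List (List Char × List Char))
    (hps : ∀ pr ∈ ps, pvGood pr) (c : Char) :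
    ∀ t, (∀ pr ∈ ps, ¬ pr.1 <+: (c :: t)) → pvFoldA ps (c :: t) = c :: pvFoldA ps t := by
  induction ps with
  | nil => intro t _; rfl
  | cons pr ps' ih =>
    intro t hm
    have hg := hps pr (by simp)
    have hmiss : ¬ pr.1.isPrefixOf (c :: t) := by
      intro h; exact hm pr (by simp) (List.isPrefixOf_iff_prefix.mp h)
    rw [show pvFoldA (pr :: ps') (c :: t) = pvFoldA ps' (pvRepc pr.1 pr.2 (c :: t)) from rfl]
    rw [pvRepc, if_neg hmiss]
    rw [ih (fun q hq => hps q (by simp [hq])) (pvRepc pr.1 pr.2 t) ?_]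
    · rfl
    · intro q hq hpre
      have hgq := hps q (by simp [hq])
      obtain ⟨q1', hq1⟩ := pvHeadEq hgq.1
      rw [hq1] at hpre
      have hc : c = 'u' := ((List.cons_prefix_cons.mp hpre).1).symm
      have h1 : q1' <+: pvRepc pr.1 pr.2 t := (List.cons_prefix_cons.mp hpre).2
      have hqt : 'u' ∉ q1' := by
        have := hgq.2.2.1; rw [hq1] at this; simpa using this
      have h2 : q1' <+: t := (pvPres pr.1 pr.2 hg.1 hg.2.1 t q1' hqt).mp h1
      refine hm q (by simp [hq]) ?_
      rw [hq1, hc]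
      exact List.cons_prefix_cons.mpr ⟨rfl, h2⟩

theorem pvFoldPush (ps : List (List Char × List Char)) (u : List Char)
    (h : ∀ pr ∈ ps, pr.1.head? = some 'u' ∧ ¬ pr.1 <+: u ∧ ¬ u <+: pr.1)
    (hu : 'u' ∉ u.drop 1) :
    ∀ x, pvFoldA ps (u ++ x) = u ++ pvFoldA ps x := by
  induction ps with
  | nil => intro x; rfl
  | cons pr ps' ih =>
    intro x
    obtain ⟨h1, h2, h3⟩ := h pr (by simp)
    rw [show pvFoldA (pr :: ps') (u ++ x) = pvFoldA ps' (pvRepc pr.1 pr.2 (u ++ x)) from rfl]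
    rw [pvRepcAppendOf pr.1 pr.2 u x h1 h2 h3 hu]
    exact ih (fun q hq => h q (by simp [hq])) _

theorem pvFoldMatch (o tg : List Char) (ps : List (List Char × List Char))
    (hin : (o, tg) ∈ ps)
    (hgood : ∀ pr ∈ ps, pvGood pr)
    (hfun : ∀ pr ∈ ps, pr.1 = o → pr.2 = tg)
    (hrel : ∀ pr ∈ ps, pr.1 ≠ o → ¬ pr.1 <+: o ∧ ¬ o <+: pr.1)
    (hrel2 : ∀ pr ∈ ps, ¬ pr.1 <+: tg ∧ ¬ tg <+: pr.1)
    (ho : o.head? = some 'u') (hou : 'u' ∉ o.drop 1)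
    (htg : 'u' ∉ tg.drop 1) :
    ∀ x, pvFoldA ps (o ++ x) = tg ++ pvFoldA ps x := by
  induction ps with
  | nil => cases hin
  | cons pr ps' ih =>
    intro x
    rw [show pvFoldA (pr :: ps') (o ++ x) = pvFoldA ps' (pvRepc pr.1 pr.2 (o ++ x)) from rfl]
    by_cases heq : pr.1 = o
    · have htg2 : pr.2 = tg := hfun pr (by simp) heq
      obtain ⟨o', ho'⟩ := pvHeadEq ho
      have hstep : pvRepc pr.1 pr.2 (o ++ x) = tg ++ pvRepc pr.1 pr.2 x := by
        rw [heq, htg2, ho']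
        rw [show ('u' :: o') ++ x = 'u' :: (o' ++ x) from rfl]
        have hpos : ('u' :: o').isPrefixOf ('u' :: (o' ++ x)) = true :=
          List.isPrefixOf_iff_prefix.mpr (List.prefix_append ('u' :: o') x)
        rw [pvRepc, if_pos hpos]
        congr 1
        have hlen : ('u' :: o').length - 1 = o'.length := by simp
        rw [hlen, List.drop_left]
      rw [hstep]
      rw [pvFoldPush ps' tg
            (fun q hq => ⟨(hgood q (by simp [hq])).1, (hrel2 q (by simp [hq])).1, (hrel2 q (by simp [hq])).2⟩)
            htg (pvRepc pr.1 pr.2 x)]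
      rfl
    · rw [pvRepcAppendOf pr.1 pr.2 o x (hgood pr (by simp)).1
            (hrel pr (by simp) heq).1 (hrel pr (by simp) heq).2 hou]
      have hin' : (o, tg) ∈ ps' := by
        rcases List.mem_cons.mp hin with h | h
        · exact absurd (congrArg Prod.fst h).symm heq
        · exact h
      rw [ih hin' (fun q hq => hgood q (by simp [hq])) (fun q hq => hfun q (by simp [hq]))
            (fun q hq => hrel q (by simp [hq])) (fun q hq => hrel2 q (by simp [hq])) _]
      rfl

-- concrete facts about the two nine-entry tables, by decide
theorem pvFactGood : ∀ pr ∈ pvReplacementsA, pvGood pr := by decide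
theorem pvFactFun : ∀ pr ∈ pvReplacementsA, ∀ pr' ∈ pvReplacementsA, pr.1 = pr'.1 → pr.2 = pr'.2 := by decide
theorem pvFactRel : ∀ pr ∈ pvReplacementsA, ∀ pr' ∈ pvReplacementsA, pr.1 ≠ pr'.1 → ¬ pr.1 <+: pr'.1 ∧ ¬ pr'.1 <+: pr.1 := by decide
theorem pvFactRel2 : ∀ pr ∈ pvReplacementsA, ∀ pr' ∈ pvReplacementsA, ¬ pr.1 <+: pr'.2 ∧ ¬ pr'.2 <+: pr.1 := by decide
theorem pvFactBA : ∀ pr ∈ pvRulesB, pr ∈ pvReplacementsA := by decide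
theorem pvFactAB : ∀ pr ∈ pvReplacementsA, pr ∈ pvRulesB := by decide
theorem pvFactNonnil : ∀ pr ∈ pvRulesB, pr.1 ≠ [] := by decide

theorem pvMain : ∀ l : List Char, pvFoldA pvReplacementsA l = pvScanB l := by
  intro l
  induction l using pvScanB.induct with
  | case1 =>
    rw [pvScanB]
    have hnil : ∀ ps : List (List Char × List Char), pvFoldA ps [] = [] := by
      intro ps
      induction ps with
      | nil => rfl
      | cons pr ps' ih =>
        rw [show pvFoldA (pr :: ps') [] = pvFoldA ps' (pvRepc pr.1 pr.2 []) from rfl]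
        rw [show pvRepc pr.1 pr.2 [] = [] from by rw [pvRepc]]
        exact ih
    exact hnil _
  | case2 c rest src tgt hfind ih =>
    have hmem : (src, tgt) ∈ pvRulesB := List.mem_of_find?_eq_some hfind
    have hmemA : (src, tgt) ∈ pvReplacementsA := pvFactBA _ hmem
    have hpre : src <+: (c :: rest) := by
      have := List.find?_some hfind
      exact List.isPrefixOf_iff_prefix.mp (by simpa using this)
    obtain ⟨x, hx⟩ := hpre
    have hgood := pvFactGood _ hmemA
    have hdec : pvFoldA pvReplacementsA (c :: rest) = tgt ++ pvFoldA pvReplacementsA x := by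
      rw [← hx]
      exact pvFoldMatch src tgt pvReplacementsA hmemA pvFactGood
        (fun q hq hq1 => pvFactFun q hq (src, tgt) hmemA hq1)
        (fun q hq hq1 => pvFactRel q hq (src, tgt) hmemA hq1)
        (fun q hq => pvFactRel2 q hq (src, tgt) hmemA)
        hgood.1 hgood.2.2.1 hgood.2.2.2 x
    have hdrop : rest.drop (src.length - 1) = x := by
      have hnn := pvFactNonnil _ hmem
      match src, hnn with
      | s0 :: s', _ =>
        have h1 : s' ++ x = rest := by
          have := hx
          rw [show (s0 :: s') ++ x = s0 :: (s' ++ x) from rfl] at this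
          exact (List.cons.injEq _ _ _ _).mp this |>.2
        rw [← h1]
        simp
    rw [hdec, pvScanB]
    simp only [hfind]
    rw [hdrop] at ih
    rw [hdrop, ih]
  | case3 c rest hfind ih =>
    have hnm : ∀ pr ∈ pvReplacementsA, ¬ pr.1 <+: (c :: rest) := by
      intro pr hpr hpre
      have := List.find?_eq_none.mp hfind pr (pvFactAB _ hpr)
      exact this (by simpa using List.isPrefixOf_iff_prefix.mpr hpre)
    rw [pvFoldCons pvReplacementsA pvFactGood c rest hnm, pvScanB]
    simp only [hfind]
    rw [ih]

-- ===== VERDICT (by name: the statement is the Claim_ definition above) =====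
theorem rewrite_css_paths_spec : Claim_equal_rewrite_css_paths := by
  intro css _
  show rewrite_css_paths css = rewrite_css_paths_alt css
  rw [pvPortA_toList, rewrite_css_paths_alt, pvMain]
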